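-- pv_equiv track=rewrite | github.com/chuanseng-ng/EE0040-Old-Attack | Simulator/reader.py | _process_logic_lists
-- ===== SOURCE A (Python) =====
-- def _process_logic_lists(list_type, lists):
--     replace_logic_gate = ['(', ')', ',','.A','.B','.C','.D','.Z',';']
--     replace_flip_flop_list = ['(', ')', ',','.D','.Q','.CP','.RN',';']
--
--     replace_list = []
--     if list_type == 'logic_gate':
--         replace_list = replace_logic_gate
--     elif list_type == 'flip_flop':
--         replace_list = replace_flip_flop_list
--     else:
--         raise Exception('Invalid list type.')
--
--     for i, line in enumerate(lists):
--         line = line.split()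
--         for j in range(len(line)):
--             for item in replace_list:
--                 line[j] = line[j].replace(item, '')
--         lists[i] = list(filter(None, line))
--
--     return lists
-- ===== SOURCE B (Python) =====
-- # B: table-dispatch the substring list, then per line strip each substring from the
-- # WHOLE line via split/join and let one final .split() tokenize and drop emptied
-- # tokens (A splits first, strips each token in a nested loop, then filters).
-- # Like A, it mutates `lists` in place and returns it.
-- def _process_logic_lists(list_type, lists):
--     table = {
--         'logic_gate': ['(', ')', ',', '.A', '.B', '.C', '.D', '.Z', ';'],
--         'flip_flop': ['(', ')', ',', '.D', '.Q', '.CP', '.RN', ';'],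
--     }
--     if list_type not in table:
--         raise Exception('Invalid list type.')
--     subs = table[list_type]
--     for i in range(len(lists)):
--         line = lists[i]
--         for sub in subs:
--             line = ''.join(line.split(sub))
--         lists[i] = line.split()
--     return lists
-- ===== Notes on version B (the rewrite author's own statement) =====
-- stated objective: idiomatic
-- what changed: B dispatches the replace list through a dict table and strips each substring from the whole line with ''.join(line.split(sub)) (split/join removal instead of str.replace), then a single final split() tokenizes and drops emptied tokens at once, replacing A's split-first, per-token nested replace loop and explicit filter(None, ...) pass.
import Mathlib
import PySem

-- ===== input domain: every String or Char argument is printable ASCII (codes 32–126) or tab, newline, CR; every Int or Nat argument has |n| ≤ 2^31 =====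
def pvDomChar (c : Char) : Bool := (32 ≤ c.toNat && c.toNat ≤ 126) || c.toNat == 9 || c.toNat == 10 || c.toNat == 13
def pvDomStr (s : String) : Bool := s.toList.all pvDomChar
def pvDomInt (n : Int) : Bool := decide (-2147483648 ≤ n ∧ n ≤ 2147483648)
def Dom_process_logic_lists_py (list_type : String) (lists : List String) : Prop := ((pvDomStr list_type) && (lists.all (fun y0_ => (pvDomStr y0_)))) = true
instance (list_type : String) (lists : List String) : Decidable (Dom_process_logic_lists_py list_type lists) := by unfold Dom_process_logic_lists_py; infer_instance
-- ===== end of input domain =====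

-- B strips every fixed substring from the whole line by split/join and lets one final split()
-- tokenize and drop the emptied tokens (A splits first, replace-strips each token in a nested
-- loop, then filters); equivalence is about the RETURN value (both Pythons also write the
-- result into `lists` in place).

-- ===== PORT A =====
-- Python A: split the line, strip each token with repeated str.replace, drop empty tokens.
def process_logic_lists_py (list_type : String) (lists : List String) : List (List String) :=
  if list_type = "logic_gate" ∨ list_type = "flip_flop" then
    let replace_list : List String :=
      if list_type = "logic_gate" then ["(", ")", ",", ".A", ".B", ".C", ".D", ".Z", ";"]
      else ["(", ")", ",", ".D", ".Q", ".CP", ".RN", ";"]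
    lists.map (fun line =>
      let toks := PySem.Str.split₀ line
      let toks := toks.map (fun tok =>
        replace_list.foldl (fun s item => PySem.Str.replace s item "") tok)
      toks.filter (fun t => t ≠ ""))
  else []  -- Python raises Exception('Invalid list type.') here; excluded by Pre_

-- ===== PORT B =====
-- Python B: dict dispatch; per line, remove each substring via ''.join(line.split(sub)),
-- then one final split().
def process_logic_lists_py_alt (list_type : String) (lists : List String) : List (List String) :=
  let table : PySem.Dict String (List String) :=
    PySem.Dict.insert
      (PySem.Dict.insert PySem.Dict.empty
        "logic_gate" ["(", ")", ",", ".A", ".B", ".C", ".D", ".Z", ";"])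
      "flip_flop" ["(", ")", ",", ".D", ".Q", ".CP", ".RN", ";"]
  match PySem.Dict.get? table list_type with
  | none => []  -- Python raises Exception('Invalid list type.') here; excluded by Pre_
  | some subs =>
      lists.map (fun line =>
        PySem.Str.split₀
          (subs.foldl (fun s sub => PySem.Str.join "" ((PySem.Str.split? s sub).getD [])) line))

-- ===== PRECONDITION & SPEC =====
-- Pre_ excludes exactly the list_type values on which the Python raises Exception('Invalid list type.').
def Pre_process_logic_lists_py (list_type : String) (lists : List String) : Prop :=
  list_type = "logic_gate" ∨ list_type = "flip_flop"
instance (list_type : String) (lists : List String) : Decidable (Pre_process_logic_lists_py list_type lists) := by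
  unfold Pre_process_logic_lists_py; infer_instance

def pvWitness_process_logic_lists_py : String × List String :=
  ("logic_gate", ["AND2 (.A(n1), .B(n2), .Z(n3));", ""])

def Spec_process_logic_lists_py (list_type : String) (lists : List String) (out : List (List String)) : Prop := out = process_logic_lists_py_alt list_type lists
instance (list_type : String) (lists : List String) (out : List (List String)) : Decidable (Spec_process_logic_lists_py list_type lists out) := by unfold Spec_process_logic_lists_py; infer_instance

-- ===== CLAIM (what is proved, stated in full; the proofs are below) =====
def Claim_equal_process_logic_lists_py : Prop := ∀ (list_type : String) (lists : List String), Dom_process_logic_lists_py list_type lists → Pre_process_logic_lists_py list_type lists → Spec_process_logic_lists_py list_type lists (process_logic_lists_py list_type lists)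

-- ===== LEMMAS AND PROOFS =====
-- remOcc old s = s with every (leftmost, non-overlapping) occurrence of old removed:
-- the common semantic core of A's str.replace(old, '') and B's ''.join(s.split(old)).
def remOcc (old : List Char) : List Char → List Char
  | [] => []
  | c :: t =>
    if old.isPrefixOf (c :: t) then remOcc old (t.drop (old.length - 1))
    else c :: remOcc old t
termination_by l => l.length
decreasing_by all_goals (simp; try omega)

theorem replace_go_eq_remOcc (old : List Char) (ho : old ≠ []) :
    ∀ (fuel : Nat) (l acc : List Char), l.length ≤ fuel →
      PySem.Chars.replace.go old [] fuel l acc = acc.reverse ++ remOcc old l := by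
  have hol : 1 ≤ old.length := by cases old with
    | nil => exact absurd rfl ho
    | cons o os => simp
  intro fuel
  induction fuel with
  | zero =>
    intro l acc hl
    have : l = [] := by cases l <;> simp_all
    subst this
    simp [PySem.Chars.replace.go, remOcc]
  | succ n ih =>
    intro l acc hl
    cases l with
    | nil => simp [PySem.Chars.replace.go, remOcc]
    | cons c t =>
      by_cases hp : old.isPrefixOf (c :: t)
      · have hdrop : (c :: t).drop old.length = t.drop (old.length - 1) := by
          cases old with
          | nil => exact absurd rfl ho
          | cons o os => simp
        rw [PySem.Chars.replace.go, if_pos hp]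
        simp only [List.reverse_nil, List.nil_append]
        rw [ih ((c :: t).drop old.length) acc (by simp at hl ⊢; omega)]
        rw [remOcc, if_pos hp, hdrop]
      · rw [PySem.Chars.replace.go, if_neg hp]
        rw [ih t (c :: acc) (by simp at hl ⊢; omega)]
        rw [remOcc, if_neg hp]
        simp

theorem replace_eq_remOcc (s old : List Char) (ho : old ≠ []) :
    PySem.Chars.replace s old [] = remOcc old s := by
  rw [PySem.Chars.replace, if_neg (by simpa using ho)]
  simpa using replace_go_eq_remOcc old ho s.length s [] le_rfl

-- B's mechanism: ''.join(s.split(old)) also removes every occurrence of old.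
theorem join_nil_flatten (parts : List (List Char)) :
    PySem.Chars.join [] parts = parts.flatten := by
  induction parts with
  | nil => simp [PySem.Chars.join_nil]
  | cons p rest ih =>
    cases rest with
    | nil => simp [PySem.Chars.join, List.intercalate]
    | cons q r =>
      rw [PySem.Chars.join_cons_cons, ih]
      simp

theorem splitOn_go_flatten (sep : List Char) (hs : sep ≠ []) :
    ∀ (fuel : Nat) (l cur : List Char) (acc : List (List Char)), l.length ≤ fuel →
      (PySem.Chars.splitOn.go sep fuel l cur acc).flatten
        = acc.reverse.flatten ++ cur.reverse ++ remOcc sep l := by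
  have hol : 1 ≤ sep.length := by cases sep with
    | nil => exact absurd rfl hs
    | cons o os => simp
  intro fuel
  induction fuel with
  | zero =>
    intro l cur acc hl
    have : l = [] := by cases l <;> simp_all
    subst this
    simp [PySem.Chars.splitOn.go, remOcc]
  | succ n ih =>
    intro l cur acc hl
    cases l with
    | nil => simp [PySem.Chars.splitOn.go, remOcc]
    | cons c t =>
      by_cases hp : sep.isPrefixOf (c :: t)
      · have hdrop : (c :: t).drop sep.length = t.drop (sep.length - 1) := by
          cases sep with
          | nil => exact absurd rfl hs
          | cons o os => simp
        rw [PySem.Chars.splitOn.go, if_pos hp]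
        rw [ih ((c :: t).drop sep.length) [] (cur.reverse :: acc) (by simp at hl ⊢; omega)]
        rw [remOcc, if_pos hp, hdrop]
        simp
      · rw [PySem.Chars.splitOn.go, if_neg hp]
        rw [ih t (c :: cur) acc (by simp at hl ⊢; omega)]
        rw [remOcc, if_neg hp]
        simp

theorem join_splitOn_eq_remOcc (s sep : List Char) (hs : sep ≠ []) :
    PySem.Chars.join [] (PySem.Chars.splitOn s sep) = remOcc sep s := by
  rw [join_nil_flatten, PySem.Chars.splitOn]
  simpa using splitOn_go_flatten sep hs (s.length + 1) s [] [] (by omega)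

-- the per-substring step of B, on the List Char side
theorem strip_toList (s sub : String) (hs : sub.toList ≠ []) :
    (PySem.Str.join "" ((PySem.Str.split? s sub).getD [])).toList
      = remOcc sub.toList s.toList := by
  have hsplit : PySem.Str.split? s sub
      = some ((PySem.Chars.splitOn s.toList sub.toList).map String.ofList) := by
    rw [PySem.Str.split?, PySem.Chars.split?, if_neg (by simpa using hs)]
    rfl
  rw [hsplit]
  simp only [Option.getD_some]
  rw [PySem.Str.toList_join]
  have : (((PySem.Chars.splitOn s.toList sub.toList).map String.ofList).map String.toList)
      = PySem.Chars.splitOn s.toList sub.toList := by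
    rw [List.map_map]
    simp [Function.comp_def]
  rw [show ("" : String).toList = ([] : List Char) from rfl, this]
  exact join_splitOn_eq_remOcc s.toList sub.toList hs

theorem remOcc_sublist (old : List Char) : ∀ s : List Char, (remOcc old s).Sublist s := by
  intro s
  induction s using remOcc.induct old with
  | case1 => simp [remOcc]
  | case2 c t hp ih =>
    rw [remOcc, if_pos hp]
    exact ih.trans ((List.drop_sublist _ t).trans (List.sublist_cons_self c t))
  | case3 c t hp ih =>
    rw [remOcc, if_neg hp]
    exact ih.cons₂ c

theorem remOcc_nil (old : List Char) : remOcc old [] = [] := by simp [remOcc]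

theorem isPrefixOf_append_space (old : List Char) (hns : ∀ x ∈ old, ¬ PySem.Chars.isspace x)
    (c : Char) (hc : PySem.Chars.isspace c) :
    ∀ (a b : List Char), old.isPrefixOf (a ++ c :: b) = old.isPrefixOf a := by
  induction old with
  | nil => intro a b; simp
  | cons o os ih =>
    intro a b
    cases a with
    | nil =>
      have hoc : (o == c) = false := by
        simp only [beq_eq_false_iff_ne, ne_eq]
        intro h; exact hns o (by simp) (h ▸ hc)
      simp [List.isPrefixOf, hoc]
    | cons x a' =>
      simp only [List.cons_append, List.isPrefixOf]
      rw [ih (fun y hy => hns y (by simp [hy])) a' b]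

theorem remOcc_append_space (old : List Char) (ho : old ≠ [])
    (hns : ∀ x ∈ old, ¬ PySem.Chars.isspace x)
    (c : Char) (hc : PySem.Chars.isspace c) :
    ∀ (a b : List Char), remOcc old (a ++ c :: b) = remOcc old a ++ c :: remOcc old b := by
  intro a b
  induction a using remOcc.induct old with
  | case1 =>
    have h0 : old.isPrefixOf (c :: b) = false := by
      have := isPrefixOf_append_space old hns c hc [] b
      simp only [List.nil_append] at this
      rw [this]
      cases old with
      | nil => exact absurd rfl ho
      | cons o os => simp [List.isPrefixOf]
    simp only [List.nil_append, remOcc_nil]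
    rw [remOcc, if_neg (by simp [h0])]
  | case2 x t hp ih =>
    have hlen : old.length ≤ t.length + 1 := by
      have := List.IsPrefix.length_le (List.isPrefixOf_iff_prefix.mp hp)
      simpa using this
    have hp' : old.isPrefixOf (x :: (t ++ c :: b)) = true := by
      have := isPrefixOf_append_space old hns c hc (x :: t) b
      simp only [List.cons_append] at this
      rw [this]; exact hp
    rw [List.cons_append, remOcc, if_pos hp', remOcc, if_pos hp]
    rw [List.drop_append_of_le_length (show old.length - 1 ≤ t.length by omega)]
    exact ih
  | case3 x t hp ih =>
    have hp' : old.isPrefixOf (x :: (t ++ c :: b)) = false := by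
      have := isPrefixOf_append_space old hns c hc (x :: t) b
      simp only [List.cons_append] at this
      exact this ▸ Bool.eq_false_iff.mpr hp
    rw [List.cons_append, remOcc, if_neg (by simp [hp']), remOcc, if_neg hp]
    simp [ih]

theorem go_acc (s : List Char) : ∀ (cur : List Char) (acc : List (List Char)),
    PySem.Chars.split₀.go s cur acc = acc.reverse ++ PySem.Chars.split₀.go s cur [] := by
  induction s with
  | nil =>
    intro cur acc
    by_cases hcur : cur = [] <;> simp [PySem.Chars.split₀.go, hcur]
  | cons c rest ih =>
    intro cur acc
    by_cases hsp : PySem.Chars.isspace c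
    · by_cases hcur : cur = []
      · simp only [PySem.Chars.split₀.go, hsp, if_true, List.isEmpty_iff, hcur]
        exact ih [] acc
      · simp only [PySem.Chars.split₀.go, hsp, if_true, List.isEmpty_iff, if_neg hcur]
        rw [ih [] (cur.reverse :: acc), ih [] [cur.reverse]]
        simp
    · simp only [PySem.Chars.split₀.go, hsp, if_false, Bool.false_eq_true]
      exact ih (c :: cur) acc

theorem go_nospace (a : List Char) : ∀ (cur : List Char),
    (∀ x ∈ a, ¬ PySem.Chars.isspace x) →
    PySem.Chars.split₀.go a cur [] =
      (if cur.reverse ++ a = [] then [] else [cur.reverse ++ a]) := by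
  induction a with
  | nil =>
    intro cur _
    by_cases hcur : cur = [] <;> simp [PySem.Chars.split₀.go, hcur]
  | cons x t ih =>
    intro cur h
    have hx : ¬ PySem.Chars.isspace x := h x (by simp)
    simp only [PySem.Chars.split₀.go, hx, if_false, Bool.false_eq_true]
    rw [ih (x :: cur) (fun y hy => h y (by simp [hy]))]
    simp

theorem go_space_split (c : Char) (hc : PySem.Chars.isspace c) (b : List Char) :
    ∀ (a : List Char) (cur : List Char), (∀ x ∈ a, ¬ PySem.Chars.isspace x) →
    PySem.Chars.split₀.go (a ++ c :: b) cur [] =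
      (if cur.reverse ++ a = [] then [] else [cur.reverse ++ a]) ++
        PySem.Chars.split₀.go b [] [] := by
  intro a
  induction a with
  | nil =>
    intro cur _
    by_cases hcur : cur = []
    · simp [PySem.Chars.split₀.go, hc, hcur]
    · simp only [List.nil_append, PySem.Chars.split₀.go, hc, if_true, List.isEmpty_iff,
        if_neg hcur]
      rw [go_acc b [] [cur.reverse]]
      simp [hcur]
  | cons x t ih =>
    intro cur h
    have hx : ¬ PySem.Chars.isspace x := h x (by simp)
    simp only [List.cons_append, PySem.Chars.split₀.go, hx, if_false, Bool.false_eq_true]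
    rw [ih (x :: cur) (fun y hy => h y (by simp [hy]))]
    simp

theorem mem_go_ne_nil : ∀ (s cur : List Char) (acc : List (List Char)),
    (∀ t ∈ acc, t ≠ []) → ∀ t ∈ PySem.Chars.split₀.go s cur acc, t ≠ [] := by
  intro s
  induction s with
  | nil =>
    intro cur acc hacc t ht
    by_cases hcur : cur = []
    · simp only [PySem.Chars.split₀.go, List.isEmpty_iff, hcur] at ht
      exact hacc t (by simpa using ht)
    · simp only [PySem.Chars.split₀.go, List.isEmpty_iff, if_neg hcur] at ht
      rw [List.mem_reverse, List.mem_cons] at ht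
      rcases ht with h | h
      · subst h; simpa using hcur
      · exact hacc t h
  | cons c rest ih =>
    intro cur acc hacc t ht
    by_cases hsp : PySem.Chars.isspace c
    · by_cases hcur : cur = []
      · simp only [PySem.Chars.split₀.go, hsp, if_true, List.isEmpty_iff, hcur] at ht
        exact ih [] acc hacc t ht
      · simp only [PySem.Chars.split₀.go, hsp, if_true, List.isEmpty_iff, if_neg hcur] at ht
        refine ih [] (cur.reverse :: acc) ?_ t ht
        intro u hu
        rcases List.mem_cons.mp hu with h | h
        · subst h; simpa using hcur
        · exact hacc u h
    · simp only [PySem.Chars.split₀.go, hsp, if_false, Bool.false_eq_true] at ht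
      exact ih (c :: cur) acc hacc t ht

theorem split0_ne_nil (s : List Char) : ∀ t ∈ PySem.Chars.split₀ s, t ≠ [] :=
  mem_go_ne_nil s [] [] (by simp)

theorem dropWhile_head_false {α : Type} (p : α → Bool) (l : List α) (x : α) (xs : List α)
    (h : l.dropWhile p = x :: xs) : p x = false := by
  have := List.head_dropWhile_not p (l := l) (by simp [h])
  simp only [h] at this
  simpa using this

theorem split0_remOcc (old : List Char) (ho : old ≠ [])
    (hns : ∀ x ∈ old, ¬ PySem.Chars.isspace x) :
    ∀ s : List Char,
      PySem.Chars.split₀ (remOcc old s) =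
        ((PySem.Chars.split₀ s).map (remOcc old)).filter (· ≠ []) := by
  intro s
  induction hn : s.length using Nat.strong_induction_on generalizing s with
  | _ n ih =>
  subst hn
  by_cases hfree : ∀ x ∈ s, ¬ PySem.Chars.isspace x
  · have hfree' : ∀ x ∈ remOcc old s, ¬ PySem.Chars.isspace x :=
      fun x hx => hfree x ((remOcc_sublist old s).subset hx)
    show PySem.Chars.split₀.go _ [] [] = List.filter _ (List.map _ (PySem.Chars.split₀.go _ [] []))
    rw [go_nospace (remOcc old s) [] hfree', go_nospace s [] hfree]
    by_cases hs : s = []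
    · subst hs; simp [remOcc_nil]
    · simp only [List.reverse_nil, List.nil_append, if_neg hs]
      by_cases hr : remOcc old s = [] <;> simp [hr]
  · push Not at hfree
    obtain ⟨x0, hx0, hx0s⟩ := hfree
    have hx0s : PySem.Chars.isspace x0 := by simpa using hx0s
    set a := s.takeWhile (fun x => ¬ PySem.Chars.isspace x) with ha
    set rest := s.dropWhile (fun x => ¬ PySem.Chars.isspace x) with hrest
    have hsplit : a ++ rest = s := List.takeWhile_append_dropWhile
    have hrest_ne : rest ≠ [] := by
      intro h
      have : x0 ∈ a := by rw [← hsplit] at hx0; simpa [h] using hx0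
      have := List.mem_takeWhile_imp this
      simp only [decide_eq_true_eq] at this
      exact this hx0s
    obtain ⟨c, b, hcb⟩ : ∃ c b, rest = c :: b := by
      cases hr : rest with
      | nil => exact absurd hr hrest_ne
      | cons c b => exact ⟨c, b, rfl⟩
    have hc : PySem.Chars.isspace c := by
      have hh := dropWhile_head_false _ s c b (by rw [← hrest]; exact hcb)
      simpa using hh
    have ha_free : ∀ x ∈ a, ¬ PySem.Chars.isspace x := by
      intro x hx
      have := List.mem_takeWhile_imp hx
      simpa using this
    have hs_eq : s = a ++ c :: b := by rw [← hsplit, hcb]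
    have hb_lt : b.length < s.length := by
      rw [hs_eq]; simp; omega
    have hL : remOcc old s = remOcc old a ++ c :: remOcc old b := by
      rw [hs_eq]; exact remOcc_append_space old ho hns c hc a b
    have ha_free' : ∀ x ∈ remOcc old a, ¬ PySem.Chars.isspace x :=
      fun x hx => ha_free x ((remOcc_sublist old a).subset hx)
    show PySem.Chars.split₀.go _ [] [] = List.filter _ (List.map _ (PySem.Chars.split₀.go _ [] []))
    rw [hL, go_space_split c hc (remOcc old b) (remOcc old a) [] ha_free']
    conv_rhs => rw [hs_eq]
    rw [go_space_split c hc b a [] ha_free]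
    rw [show PySem.Chars.split₀.go b [] [] = PySem.Chars.split₀ b from rfl,
        show PySem.Chars.split₀.go (remOcc old b) [] [] = PySem.Chars.split₀ (remOcc old b) from rfl]
    rw [ih b.length hb_lt b rfl]
    rw [List.map_append, List.filter_append]
    congr 1
    by_cases hanil : a = []
    · simp [hanil, remOcc_nil]
    · simp only [List.reverse_nil, List.nil_append, if_neg hanil, List.map_cons, List.map_nil]
      by_cases hra : remOcc old a = [] <;> simp [hra]

theorem foldl_remOcc_nil (olds : List (List Char)) :
    olds.foldl (fun s o => remOcc o s) [] = [] := by
  induction olds with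
  | nil => rfl
  | cons o os ih => simpa [remOcc_nil] using ih

theorem filter_map_filter (f : List Char → List Char) (hf : f [] = []) :
    ∀ xs : List (List Char),
      (((xs.filter (· ≠ [])).map f).filter (· ≠ [])) = ((xs.map f).filter (· ≠ [])) := by
  intro xs
  induction xs with
  | nil => rfl
  | cons x t ih =>
    by_cases hx : x = []
    · subst hx
      simp [hf]
      simpa using ih
    · by_cases hfx : f x = []
      · simp [hx, hfx]
        simpa using ih
      · simp [hx, hfx]
        simpa using ih

theorem split0_foldl_remOcc :
    ∀ (olds : List (List Char)),
      (∀ o ∈ olds, o ≠ [] ∧ ∀ x ∈ o, ¬ PySem.Chars.isspace x) →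
      ∀ s : List Char,
        PySem.Chars.split₀ (olds.foldl (fun s o => remOcc o s) s) =
          ((PySem.Chars.split₀ s).map (fun t => olds.foldl (fun s o => remOcc o s) t)).filter
            (· ≠ []) := by
  intro olds
  induction olds with
  | nil =>
    intro _ s
    simp only [List.foldl_nil, List.map_id']
    symm
    exact List.filter_eq_self.mpr (fun t ht => by simpa using split0_ne_nil s t ht)
  | cons o os ih =>
    intro h s
    have ho := (h o (by simp)).1
    have hons := (h o (by simp)).2
    have hos : ∀ o' ∈ os, o' ≠ [] ∧ ∀ x ∈ o', ¬ PySem.Chars.isspace x :=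
      fun o' ho' => h o' (by simp [ho'])
    simp only [List.foldl_cons]
    rw [ih hos (remOcc o s), split0_remOcc o ho hons s]
    rw [filter_map_filter (fun t => os.foldl (fun s o => remOcc o s) t) (foldl_remOcc_nil os)
      ((PySem.Chars.split₀ s).map (remOcc o))]
    rw [List.map_map]
    rfl

-- A's per-token fold of str.replace, moved to the List Char side
theorem foldl_replace_toList (oldsS : List String) : ∀ t : String,
    (oldsS.foldl (fun s it => PySem.Str.replace s it "") t).toList
      = (oldsS.map String.toList).foldl (fun s o => PySem.Chars.replace s o []) t.toList := by
  induction oldsS with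
  | nil => intro t; rfl
  | cons o os ih =>
    intro t
    simp only [List.map_cons, List.foldl_cons]
    rw [ih (PySem.Str.replace t o "")]
    simp [PySem.Str.toList_replace]

theorem foldl_replace_eq_remOcc (olds : List (List Char)) (h : ∀ o ∈ olds, o ≠ []) :
    ∀ s, olds.foldl (fun s o => PySem.Chars.replace s o []) s
        = olds.foldl (fun s o => remOcc o s) s := by
  induction olds with
  | nil => intro s; rfl
  | cons o os ih =>
    intro s
    simp only [List.foldl_cons]
    rw [replace_eq_remOcc s o (h o (by simp)), ih (fun o' ho' => h o' (by simp [ho']))]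

-- B's per-line fold of split/join, moved to the List Char side
theorem foldl_strip_toList (subsS : List String) (h : ∀ o ∈ subsS, o.toList ≠ []) :
    ∀ t : String,
      (subsS.foldl (fun s sub => PySem.Str.join "" ((PySem.Str.split? s sub).getD [])) t).toList
        = (subsS.map String.toList).foldl (fun s o => remOcc o s) t.toList := by
  induction subsS with
  | nil => intro t; rfl
  | cons o os ih =>
    intro t
    simp only [List.map_cons, List.foldl_cons]
    rw [ih (fun o' ho' => h o' (by simp [ho']))
      (PySem.Str.join "" ((PySem.Str.split? t o).getD []))]
    rw [strip_toList t o (h o (by simp))]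

theorem filter_ne_empty_map_ofList (Y : List (List Char)) :
    (Y.map String.ofList).filter (fun t => t ≠ "") = (Y.filter (· ≠ [])).map String.ofList := by
  induction Y with
  | nil => rfl
  | cons y ys ih =>
    have : (String.ofList y = "") ↔ y = [] := by
      constructor
      · intro h
        have := congrArg String.toList h
        simpa using this
      · intro h; subst h; rfl
    by_cases hy : y = []
    · subst hy
      simp [show String.ofList ([] : List Char) = "" from rfl]
      simpa using ih
    · have hns : ¬ (String.ofList y = "") := fun hh => hy (this.mp hh)
      simp [hns, hy, List.cons.injEq]
      simpa using ih

theorem line_eq (oldsS : List String)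
    (h : ∀ o ∈ oldsS, o.toList ≠ [] ∧ ∀ x ∈ o.toList, ¬ PySem.Chars.isspace x) (line : String) :
    PySem.Str.split₀
        (oldsS.foldl (fun s sub => PySem.Str.join "" ((PySem.Str.split? s sub).getD [])) line)
      = ((PySem.Str.split₀ line).map
          (fun tok => oldsS.foldl (fun s item => PySem.Str.replace s item "") tok)).filter
          (fun t => t ≠ "") := by
  have hmap : ∀ o ∈ oldsS.map String.toList, o ≠ [] ∧ ∀ x ∈ o, ¬ PySem.Chars.isspace x := by
    intro o ho
    obtain ⟨oS, hoS, rfl⟩ := List.mem_map.mp ho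
    exact h oS hoS
  have hne : ∀ o ∈ oldsS.map String.toList, o ≠ [] := fun o ho => (hmap o ho).1
  -- left side (B)
  rw [PySem.Str.split₀.eq_1
    (oldsS.foldl (fun s sub => PySem.Str.join "" ((PySem.Str.split? s sub).getD [])) line)]
  rw [foldl_strip_toList oldsS (fun o ho => (h o ho).1) line]
  rw [split0_foldl_remOcc (oldsS.map String.toList) hmap line.toList]
  -- right side (A)
  rw [PySem.Str.split₀.eq_1 line, List.map_map]
  have hfun : (fun tok => oldsS.foldl (fun s item => PySem.Str.replace s item "") tok) ∘
      String.ofList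
      = String.ofList ∘ (fun t => (oldsS.map String.toList).foldl (fun s o => remOcc o s) t) := by
    funext w
    apply String.toList_inj.mp
    simp only [Function.comp_apply]
    rw [foldl_replace_toList oldsS (String.ofList w)]
    simp only [String.toList_ofList]
    rw [foldl_replace_eq_remOcc _ hne w]
  rw [hfun, ← List.map_map, filter_ne_empty_map_ofList]

theorem branch_eq (rl : List String)
    (h : ∀ o ∈ rl, o.toList ≠ [] ∧ ∀ x ∈ o.toList, ¬ PySem.Chars.isspace x)
    (lists : List String) :
    lists.map (fun line =>
        ((PySem.Str.split₀ line).map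
          (fun tok => rl.foldl (fun s item => PySem.Str.replace s item "") tok)).filter
          (fun t => t ≠ ""))
      = lists.map (fun line =>
          PySem.Str.split₀
            (rl.foldl (fun s sub => PySem.Str.join "" ((PySem.Str.split? s sub).getD [])) line)) := by
  rw [show (fun line => PySem.Str.split₀
        (rl.foldl (fun s sub => PySem.Str.join "" ((PySem.Str.split? s sub).getD [])) line))
      = (fun line => ((PySem.Str.split₀ line).map
          (fun tok => rl.foldl (fun s item => PySem.Str.replace s item "") tok)).filter
          (fun t => t ≠ "")) from funext fun line => line_eq rl h line]

-- ===== VERDICT (by name: the statement is the Claim_ definition above) =====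
theorem process_logic_lists_py_spec : Claim_equal_process_logic_lists_py := by
  intro list_type lists _ hpre
  unfold Spec_process_logic_lists_py
  rcases hpre with h | h <;> subst h
  · have hA : process_logic_lists_py "logic_gate" lists
        = lists.map (fun line =>
            ((PySem.Str.split₀ line).map
              (fun tok => (["(", ")", ",", ".A", ".B", ".C", ".D", ".Z", ";"] : List String).foldl
                (fun s item => PySem.Str.replace s item "") tok)).filter (fun t => t ≠ "")) := rfl
    have hB : process_logic_lists_py_alt "logic_gate" lists
        = lists.map (fun line =>
            PySem.Str.split₀
              ((["(", ")", ",", ".A", ".B", ".C", ".D", ".Z", ";"] : List String).foldl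
                (fun s sub => PySem.Str.join "" ((PySem.Str.split? s sub).getD [])) line)) := rfl
    rw [hA, hB]
    exact branch_eq ["(", ")", ",", ".A", ".B", ".C", ".D", ".Z", ";"]
      (by simp [PySem.Chars.isspace]) lists
  · have hA : process_logic_lists_py "flip_flop" lists
        = lists.map (fun line =>
            ((PySem.Str.split₀ line).map
              (fun tok => (["(", ")", ",", ".D", ".Q", ".CP", ".RN", ";"] : List String).foldl
                (fun s item => PySem.Str.replace s item "") tok)).filter (fun t => t ≠ "")) := rfl
    have hB : process_logic_lists_py_alt "flip_flop" lists
        = lists.map (fun line =>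
            PySem.Str.split₀
              ((["(", ")", ",", ".D", ".Q", ".CP", ".RN", ";"] : List String).foldl
                (fun s sub => PySem.Str.join "" ((PySem.Str.split? s sub).getD [])) line)) := rfl
    rw [hA, hB]
    exact branch_eq ["(", ")", ",", ".D", ".Q", ".CP", ".RN", ";"]
      (by simp [PySem.Chars.isspace]) lists
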